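-- pv_equiv track=rewrite | github.com/emilholmegaard/sokrates-kafka-viz | kafka_viz/visualization/utils.py | clean_node_id
-- ===== SOURCE A (Python) =====
-- def clean_node_id(topic: str) -> str:
--     """Create safe node ID by replacing invalid characters.
--
--     Args:
--         topic: Topic name to clean
--
--     Returns:
--         str: Safe node ID
--     """
--     # Special case for hash topic
--     if topic == "#{":
--         return "topic_hash"
--
--     replacements = {
--         "${": "",
--         "}": "",
--         "-": "_",
--         ".": "_",
--         "#": "hash",
--         "@": "at",
--         " ": "_",
--         ":": "_",
--         "/": "_",
--         "\\": "_",
--         "{": "",  # Add explicit handling for curly braces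
--         "}": "",
--     }
--     result = topic
--     for old, new in replacements.items():
--         result = result.replace(old, new)
--     return result
-- ===== SOURCE B (Python) =====
-- def clean_node_id(topic: str) -> str:
--     """Create safe node ID by replacing invalid characters (single left-to-right pass)."""
--     if topic == "#{":
--         return "topic_hash"
--     table = {"{": "", "}": "", "-": "_", ".": "_", " ": "_",
--              ":": "_", "/": "_", "\\": "_", "#": "hash", "@": "at"}
--     pieces = []
--     i = 0
--     n = len(topic)
--     while i < n:
--         if topic.startswith("${", i):
--             i += 2
--             continue
--         c = topic[i]
--         pieces.append(table.get(c, c))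
--         i += 1
--     return "".join(pieces)
-- ===== Notes on version B (the rewrite author's own statement) =====
-- stated objective: idiomatic
-- what changed: A makes eleven full passes over the string, one str.replace per dict entry; B makes a single left-to-right pass with a two-character lookahead for the dollar-brace deletion pattern and a per-character replacement table, joining the emitted pieces.
import Mathlib
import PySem

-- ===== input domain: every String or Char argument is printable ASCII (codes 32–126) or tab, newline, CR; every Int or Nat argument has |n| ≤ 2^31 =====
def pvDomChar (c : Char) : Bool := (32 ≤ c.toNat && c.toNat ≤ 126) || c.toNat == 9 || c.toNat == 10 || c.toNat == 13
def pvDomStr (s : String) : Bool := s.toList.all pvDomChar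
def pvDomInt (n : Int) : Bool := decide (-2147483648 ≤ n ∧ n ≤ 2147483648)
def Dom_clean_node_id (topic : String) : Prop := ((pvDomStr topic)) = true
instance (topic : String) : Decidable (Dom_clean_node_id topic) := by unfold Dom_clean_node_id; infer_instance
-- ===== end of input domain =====

-- B replaces A's eleven full-string `.replace` passes by one left-to-right scan with a
-- two-character lookahead for "${" and a per-character table (objective: idiomatic single pass).

-- ===== PORT A =====
-- the replacements dict of A, in its items() order ("}" appears once: the duplicate key overwrites in place)
def pvRepls : List (String × String) :=
  [("${", ""), ("}", ""), ("-", "_"), (".", "_"), ("#", "hash"), ("@", "at"),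
   (" ", "_"), (":", "_"), ("/", "_"), ("\\", "_"), ("{", "")]

def clean_node_id (topic : String) : String :=
  if topic = "#{" then "topic_hash"
  else pvRepls.foldl (fun result p => PySem.Str.replace result p.1 p.2) topic

-- ===== PORT B =====
-- B's per-character table (dict.get with the character itself as default)
def pvTableB : List (Char × List Char) :=
  [('{', []), ('}', []), ('-', ['_']), ('.', ['_']), (' ', ['_']),
   (':', ['_']), ('/', ['_']), ('\\', ['_']), ('#', "hash".toList), ('@', "at".toList)]

-- B's while loop: one pass over the remaining characters, "${" lookahead first
def pvScanB : List Char → List (List Char)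
  | [] => []
  | [c] => [(pvTableB.lookup c).getD [c]]
  | c₁ :: c₂ :: t =>
    if c₁ = '$' ∧ c₂ = '{' then pvScanB t
    else ((pvTableB.lookup c₁).getD [c₁]) :: pvScanB (c₂ :: t)

def clean_node_id_alt (topic : String) : String :=
  if topic = "#{" then "topic_hash"
  else String.ofList (PySem.Chars.join [] (pvScanB topic.toList))

-- ===== PRECONDITION & SPEC =====
def Spec_clean_node_id (topic : String) (out : String) : Prop := out = clean_node_id_alt topic
instance (topic : String) (out : String) : Decidable (Spec_clean_node_id topic out) := by unfold Spec_clean_node_id; infer_instance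

-- ===== CLAIM (what is proved, stated in full; the proofs are below) =====
def Claim_equal_clean_node_id : Prop := ∀ (topic : String), Dom_clean_node_id topic → Spec_clean_node_id topic (clean_node_id topic)

-- ===== LEMMAS AND PROOFS =====

-- the combined effect of A's ten single-character replacements on one character
def pvG (c : Char) : List Char := (pvTableB.lookup c).getD [c]

-- "${"-removal as a recursion (what A's first replace pass computes)
def pvRemDS : List Char → List Char
  | [] => []
  | [c] => [c]
  | c₁ :: c₂ :: t =>
    if c₁ = '$' ∧ c₂ = '{' then pvRemDS t
    else c₁ :: pvRemDS (c₂ :: t)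

theorem replace_go_single (c : Char) (new : List Char) :
    ∀ (fuel : Nat) (l acc : List Char), l.length ≤ fuel →
      PySem.Chars.replace.go [c] new fuel l acc
        = acc.reverse ++ l.flatMap (fun x => if x = c then new else [x]) := by
  intro fuel
  induction fuel with
  | zero =>
    intro l acc h
    have hl : l = [] := List.length_eq_zero_iff.mp (Nat.le_zero.mp h)
    subst hl; simp [PySem.Chars.replace.go]
  | succ n ih =>
    intro l acc h
    cases l with
    | nil => simp [PySem.Chars.replace.go]
    | cons x t =>
      simp only [PySem.Chars.replace.go]
      by_cases hx : x = c
      · subst hx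
        simp only [List.isPrefixOf, Bool.and_true, beq_self_eq_true, if_pos]
        rw [ih _ _ (by simpa using Nat.le_of_succ_le_succ h)]
        simp
      · have : List.isPrefixOf [c] (x :: t) = false := by
          simp [List.isPrefixOf]; exact fun hc => absurd hc.symm hx
        rw [this]
        simp only [Bool.false_eq_true, if_false]
        rw [ih _ _ (by simpa using Nat.le_of_succ_le_succ h)]
        simp [hx]

theorem replace_single (c : Char) (new s : List Char) :
    PySem.Chars.replace s [c] new = s.flatMap (fun x => if x = c then new else [x]) := by
  rw [PySem.Chars.replace]
  simp only [List.isEmpty_cons, Bool.false_eq_true, if_false]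
  simpa using replace_go_single c new s.length s [] le_rfl

theorem replace_go_ds :
    ∀ (fuel : Nat) (l acc : List Char), l.length ≤ fuel →
      PySem.Chars.replace.go ['$', '{'] [] fuel l acc = acc.reverse ++ pvRemDS l := by
  intro fuel
  induction fuel with
  | zero =>
    intro l acc h
    have hl : l = [] := List.length_eq_zero_iff.mp (Nat.le_zero.mp h)
    subst hl; simp [PySem.Chars.replace.go, pvRemDS]
  | succ n ih =>
    intro l acc h
    cases l with
    | nil => simp [PySem.Chars.replace.go, pvRemDS]
    | cons x t =>
      simp only [PySem.Chars.replace.go]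
      cases t with
      | nil =>
        have : List.isPrefixOf ['$', '{'] [x] = false := by simp [List.isPrefixOf]
        rw [this]
        simp only [Bool.false_eq_true, if_false]
        rw [ih _ _ (by simp)]
        simp [pvRemDS]
      | cons y t' =>
        by_cases hd : x = '$' ∧ y = '{'
        · obtain ⟨h1, h2⟩ := hd; subst h1; subst h2
          have : List.isPrefixOf ['$', '{'] ('$' :: '{' :: t') = true := by simp [List.isPrefixOf]
          rw [this]
          simp only [if_pos]
          rw [ih _ _ (by simp at h ⊢; omega)]
          rw [pvRemDS, if_pos ⟨rfl, rfl⟩]; simp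
        · have : List.isPrefixOf ['$', '{'] (x :: y :: t') = false := by
            simp [List.isPrefixOf]
            intro h1 h2; exact hd ⟨h1.symm, h2.symm⟩
          rw [this]
          simp only [Bool.false_eq_true, if_false]
          rw [ih _ _ (by simpa using Nat.le_of_succ_le_succ h)]
          rw [pvRemDS, if_neg hd]; simp

theorem replace_ds (s : List Char) :
    PySem.Chars.replace s ['$', '{'] [] = pvRemDS s := by
  rw [PySem.Chars.replace]
  simp only [List.isEmpty_cons, Bool.false_eq_true, if_false]
  simpa using replace_go_ds s.length s [] le_rfl


theorem join_flatten (ps : List (List Char)) : PySem.Chars.join [] ps = ps.flatten := by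
  show (List.intersperse ([]:List Char) ps).flatten = ps.flatten
  induction ps with
  | nil => rfl
  | cons a t ih =>
    cases t with
    | nil => simp
    | cons b u => simp_all [List.intersperse]

-- the effect of A's ten single-character passes on one already-"${"-free character
theorem chain_head (c : Char) :
    (((((((((if c = '}' then ([] : List Char) else [c]).flatMap
      (fun x => if x = '-' then ['_'] else [x])).flatMap
      (fun x => if x = '.' then ['_'] else [x])).flatMap
      (fun x => if x = '#' then "hash".toList else [x])).flatMap
      (fun x => if x = '@' then "at".toList else [x])).flatMap
      (fun x => if x = ' ' then ['_'] else [x])).flatMap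
      (fun x => if x = ':' then ['_'] else [x])).flatMap
      (fun x => if x = '/' then ['_'] else [x])).flatMap
      (fun x => if x = '\\' then ['_'] else [x])).flatMap
      (fun x => if x = '{' then [] else [x]) = pvG c := by
  by_cases h1 : c = '}'
  · subst h1; decide
  by_cases h2 : c = '-'
  · subst h2; decide
  by_cases h3 : c = '.'
  · subst h3; decide
  by_cases h4 : c = '#'
  · subst h4; decide
  by_cases h5 : c = '@'
  · subst h5; decide
  by_cases h6 : c = ' '
  · subst h6; decide
  by_cases h7 : c = ':'
  · subst h7; decide
  by_cases h8 : c = '/'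
  · subst h8; decide
  by_cases h9 : c = '\\'
  · subst h9; decide
  by_cases h10 : c = '{'
  · subst h10; decide
  · have b : ∀ k : Char, ¬ c = k → (c == k) = false := fun k hk => beq_eq_false_iff_ne.mpr hk
    simp [pvG, pvTableB, List.lookup, h1, h2, h3, h4, h5, h6, h7, h8, h9, h10,
      b _ h1, b _ h2, b _ h3, b _ h4, b _ h5, b _ h6, b _ h7, b _ h8, b _ h9, b _ h10]

theorem chain_eq (u : List Char) :
    (((((((((u.flatMap (fun x => if x = '}' then [] else [x])).flatMap
      (fun x => if x = '-' then ['_'] else [x])).flatMap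
      (fun x => if x = '.' then ['_'] else [x])).flatMap
      (fun x => if x = '#' then "hash".toList else [x])).flatMap
      (fun x => if x = '@' then "at".toList else [x])).flatMap
      (fun x => if x = ' ' then ['_'] else [x])).flatMap
      (fun x => if x = ':' then ['_'] else [x])).flatMap
      (fun x => if x = '/' then ['_'] else [x])).flatMap
      (fun x => if x = '\\' then ['_'] else [x])).flatMap
      (fun x => if x = '{' then [] else [x]) = u.flatMap pvG := by
  induction u with
  | nil => simp
  | cons c u' ih =>
    simp only [List.flatMap_cons, List.flatMap_append]
    rw [ih, chain_head]

-- B's single pass computes exactly "map pvG over the '${'-free residue"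
theorem scan_eq (s : List Char) : (pvScanB s).flatten = (pvRemDS s).flatMap pvG := by
  induction s using pvScanB.induct with
  | case1 => simp [pvScanB, pvRemDS]
  | case2 c => simp [pvScanB, pvRemDS, pvG]
  | case3 c1 c2 t hd ih =>
    rw [pvScanB, if_pos hd, pvRemDS, if_pos hd]; exact ih
  | case4 c1 c2 t hd ih =>
    rw [pvScanB, if_neg hd, pvRemDS, if_neg hd]
    simp only [List.flatten_cons, List.flatMap_cons, ih, pvG]

-- ===== VERDICT (by name: the statement is the Claim_ definition above) =====
theorem clean_node_id_spec : Claim_equal_clean_node_id := by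
  intro topic _
  unfold Spec_clean_node_id clean_node_id clean_node_id_alt
  by_cases h : topic = "#{"
  · simp [h]
  · simp only [if_neg h, pvRepls, List.foldl_cons, List.foldl_nil]
    apply String.toList_inj.mp
    simp only [PySem.Str.toList_replace, String.toList_ofList]
    have e0 : ("${" : String).toList = ['$', '{'] := rfl
    have e1 : ("" : String).toList = [] := rfl
    have e2 : ("}" : String).toList = ['}'] := rfl
    have e3 : ("_" : String).toList = ['_'] := rfl
    have e4 : ("-" : String).toList = ['-'] := rfl
    have e5 : ("." : String).toList = ['.'] := rfl
    have e6 : ("#" : String).toList = ['#'] := rfl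
    have e7 : ("@" : String).toList = ['@'] := rfl
    have e8 : (" " : String).toList = [' '] := rfl
    have e9 : (":" : String).toList = [':'] := rfl
    have e10 : ("/" : String).toList = ['/'] := rfl
    have e11 : ("\\" : String).toList = ['\\'] := rfl
    have e12 : ("{" : String).toList = ['{'] := rfl
    rw [e0, e1, e2, e3, e4, e5, e6, e7, e8, e9, e10, e11, e12]
    rw [replace_ds]
    simp only [replace_single]
    rw [join_flatten, scan_eq, chain_eq]
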